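-- pv_equiv track=rewrite | github.com/HONGMOEJI/coding-test | 프로그래머스/0/181893. 배열 조각하기/배열 조각하기.py | solution
-- ===== SOURCE A (Python) =====
-- def solution(arr, query):
--     answer = []
--     for idx, value in enumerate(query):
--         if idx % 2 == 0:
--             arr = arr[:value+1]
--         else:
--             arr = arr[value:]
--     return arr
-- ===== SOURCE B (Python) =====
-- def _clamp(i, n):
--     # Python slice-bound normalization for a list of length n
--     if i < 0:
--         i += n
--     return min(max(i, 0), n)
--
-- def solution(arr, query):
--     lo, hi = 0, len(arr)
--     for idx, v in enumerate(query):
--         n = hi - lo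
--         if idx % 2 == 0:
--             hi = lo + _clamp(v + 1, n)
--         else:
--             lo = lo + _clamp(v, n)
--     return arr[lo:hi]
-- ===== Notes on version B (the rewrite author's own statement) =====
-- stated objective: alternative
-- what changed: Instead of materializing a new list slice per query, B tracks the current window as a pair of offsets (lo, hi) into the original array with Python's slice-bound clamping, and performs a single slice at the end; on the measured input family this was not faster.
import Mathlib
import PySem

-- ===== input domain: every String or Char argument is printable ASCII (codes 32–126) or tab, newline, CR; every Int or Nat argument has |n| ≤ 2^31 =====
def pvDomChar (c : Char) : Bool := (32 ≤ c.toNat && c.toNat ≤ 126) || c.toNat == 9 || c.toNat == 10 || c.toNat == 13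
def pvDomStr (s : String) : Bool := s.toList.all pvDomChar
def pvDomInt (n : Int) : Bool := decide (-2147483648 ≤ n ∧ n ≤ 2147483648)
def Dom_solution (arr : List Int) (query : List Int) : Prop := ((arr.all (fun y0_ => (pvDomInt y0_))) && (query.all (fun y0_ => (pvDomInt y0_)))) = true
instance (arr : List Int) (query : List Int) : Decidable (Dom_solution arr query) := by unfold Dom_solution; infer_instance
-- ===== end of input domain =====

-- B replaces A's per-query list slicing with offset updates (lo, hi) plus a single final slice (alternative algorithm; not measured faster).

-- ===== PORT A =====
-- A's enumerate loop: 'idx' is the running index, 'arr' the re-sliced state.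
def solutionLoopA (arr : List Int) (idx : Nat) : List Int → List Int
  | [] => arr
  | v :: rest =>
    if idx % 2 == 0 then
      solutionLoopA (PySem.List.slice arr none (some (v + 1))) (idx + 1) rest
    else
      solutionLoopA (PySem.List.slice arr (some v) none) (idx + 1) rest

def solution (arr : List Int) (query : List Int) : List Int :=
  solutionLoopA arr 0 query

-- ===== PORT B =====
-- Source B's _clamp: Python slice-bound normalization for length n.
def pyClamp (i : Int) (n : Nat) : Nat :=
  (min (max (if i < 0 then i + n else i) 0) n).toNat

-- Source B's loop: track the window (lo, hi) into the original arr.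
def solutionLoopB (lo hi : Nat) (idx : Nat) : List Int → Nat × Nat
  | [] => (lo, hi)
  | v :: rest =>
    let n := hi - lo
    if idx % 2 == 0 then
      solutionLoopB lo (lo + pyClamp (v + 1) n) (idx + 1) rest
    else
      solutionLoopB (lo + pyClamp v n) hi (idx + 1) rest

def solution_alt (arr : List Int) (query : List Int) : List Int :=
  let p := solutionLoopB 0 arr.length 0 query
  PySem.List.slice arr (some (p.1 : Int)) (some (p.2 : Int))

-- ===== PRECONDITION & SPEC =====
def Spec_solution (arr : List Int) (query : List Int) (out : List Int) : Prop := out = solution_alt arr query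
instance (arr : List Int) (query : List Int) (out : List Int) : Decidable (Spec_solution arr query out) := by unfold Spec_solution; infer_instance

-- ===== CLAIM (what is proved, stated in full; the proofs are below) =====
def Claim_equal_solution : Prop := ∀ (arr : List Int) (query : List Int), Dom_solution arr query → Spec_solution arr query (solution arr query)

-- ===== LEMMAS AND PROOFS =====

theorem pyClamp_eq_clampIdx (i : Int) (n : Nat) : pyClamp i n = PySem.List.clampIdx n i := by
  unfold pyClamp PySem.List.clampIdx
  split_ifs with h h2 <;> omega

theorem pyClamp_le (i : Int) (n : Nat) : pyClamp i n ≤ n := by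
  unfold pyClamp; omega

theorem slice_none_some_eq {α : Type} (xs : List α) (b : Int) :
    PySem.List.slice xs none (some b) = xs.take (PySem.List.clampIdx xs.length b) := by
  simp [PySem.List.slice]

theorem loop_eq (arr : List Int) : ∀ (q : List Int) (idx lo hi : Nat),
    lo ≤ hi → hi ≤ arr.length →
    solutionLoopA ((arr.drop lo).take (hi - lo)) idx q =
      (fun p => (arr.drop p.1).take (p.2 - p.1)) (solutionLoopB lo hi idx q) := by
  intro q
  induction q with
  | nil => intro idx lo hi _ _; rfl
  | cons v rest ih =>
    intro idx lo hi hlohi hhi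
    have hlen : ((arr.drop lo).take (hi - lo)).length = hi - lo := by
      simp [List.length_take, List.length_drop]; omega
    by_cases hp : idx % 2 == 0
    · simp only [solutionLoopA, solutionLoopB, hp, if_pos]
      rw [slice_none_some_eq, hlen, ← pyClamp_eq_clampIdx, List.take_take]
      have hle := pyClamp_le (v + 1) (hi - lo)
      rw [min_eq_left hle]
      have H := ih (idx + 1) lo (lo + pyClamp (v + 1) (hi - lo)) (by omega) (by omega)
      rw [Nat.add_sub_cancel_left] at H
      exact H
    · simp only [solutionLoopA, solutionLoopB, hp, Bool.false_eq_true, if_false]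
      rw [PySem.List.slice_some_none, hlen, ← pyClamp_eq_clampIdx, List.drop_take,
        List.drop_drop]
      have hle := pyClamp_le v (hi - lo)
      have H := ih (idx + 1) (lo + pyClamp v (hi - lo)) hi (by omega) (by omega)
      have e2 : hi - lo - pyClamp v (hi - lo) = hi - (lo + pyClamp v (hi - lo)) := by omega
      rw [e2]
      exact H

-- ===== VERDICT (by name: the statement is the Claim_ definition above) =====
theorem solution_spec : Claim_equal_solution := by
  intro arr query _
  unfold Spec_solution solution solution_alt
  have h := loop_eq arr query 0 0 arr.length (Nat.zero_le _) (le_refl _)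
  simp only [List.drop_zero, Nat.sub_zero, List.take_length] at h
  rw [h, PySem.List.slice_natCast]
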